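-- pv_equiv track=rewrite | github.com/juanmichero/python | parcial2.py | subsecuencia_mas_larga
-- ===== SOURCE A (Python) =====
-- def subsecuencia_mas_larga(tipos_pacientes_atendidos: list[str]) -> int:
--     lastIndexWasDogOrCat: bool = False
--     lastLongestIndex: int = 0
--     currentCountingIndex: int = 0
--     lastLongestIndexLength: int = 0
--     currentCountingIndexLength: int = 0
--     for i in range(0, len(tipos_pacientes_atendidos)):
--         currentAnimal: str = tipos_pacientes_atendidos[i]
--         #Chequeamos si empieza una secuencia nueva
--         if(not lastIndexWasDogOrCat):
--             if(currentAnimal == "perro" or currentAnimal == "gato"):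
--                 lastIndexWasDogOrCat = True
--                 currentCountingIndexLength += 1
--                 currentCountingIndex = i
--         #Esta contunuando una secuencia
--         else:
--             #La secuencia sigue
--             if(currentAnimal == "perro" or currentAnimal == "gato"):
--                 currentCountingIndexLength += 1
--             #la secuencia se corto
--             else:
--                 currentCountingIndexLength = 0
--                 lastIndexWasDogOrCat = False
--
--         #Updatear valores
--         if(currentCountingIndexLength > lastLongestIndexLength):
--             lastLongestIndexLength = currentCountingIndexLength
--             lastLongestIndex = currentCountingIndex
--
--     return lastLongestIndex
-- ===== SOURCE B (Python) =====
-- def subsecuencia_mas_larga(tipos_pacientes_atendidos: list[str]) -> int: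
--     # Phase 1: collect maximal runs of "perro"/"gato" as (start, length)
--     runs = []
--     n = len(tipos_pacientes_atendidos)
--     i = 0
--     while i < n:
--         if tipos_pacientes_atendidos[i] in ("perro", "gato"):
--             j = i
--             while j < n and tipos_pacientes_atendidos[j] in ("perro", "gato"):
--                 j += 1
--             runs.append((i, j - i))
--             i = j
--         else:
--             i += 1
--     # Phase 2: first run with strictly greatest length; default start 0
--     best_start, best_len = 0, 0
--     for start, length in runs:
--         if length > best_len:
--             best_start, best_len = start, length
--     return best_start
-- ===== Notes on version B (the rewrite author's own statement) =====
-- stated objective: alternative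
-- what changed: Replaced A's single flag-driven stateful scan with a two-phase 'segment then select' algorithm: first collect the maximal perro/gato runs as (start, length) pairs, then pick the first run of strictly greatest length (default 0).
import Mathlib
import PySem

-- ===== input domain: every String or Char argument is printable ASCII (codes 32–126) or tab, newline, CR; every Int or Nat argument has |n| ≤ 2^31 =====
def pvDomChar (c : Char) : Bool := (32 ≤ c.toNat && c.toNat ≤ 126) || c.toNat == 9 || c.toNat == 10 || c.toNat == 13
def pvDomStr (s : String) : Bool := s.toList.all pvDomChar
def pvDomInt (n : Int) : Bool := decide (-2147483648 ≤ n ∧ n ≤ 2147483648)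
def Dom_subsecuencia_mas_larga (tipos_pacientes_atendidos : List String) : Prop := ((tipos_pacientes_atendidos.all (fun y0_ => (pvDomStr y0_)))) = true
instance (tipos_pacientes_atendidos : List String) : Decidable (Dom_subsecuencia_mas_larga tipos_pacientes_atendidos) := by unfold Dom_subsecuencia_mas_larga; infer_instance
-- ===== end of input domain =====

-- B replaces A's flag-driven stateful scan by a two-phase "collect runs, then select the
-- first longest" algorithm; objective: alternative decomposition (same asymptotic cost).


-- ===== PORT A =====
-- A's for-loop over indices, carried as structural recursion over the list with the
-- running index and A's five state variables.
def pvLoopA : List String → Int → Bool → Int → Int → Int → Int → Int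
  | [], _, _, lastLongestIndex, _, _, _ => lastLongestIndex
  | currentAnimal :: rest, i, lastIndexWasDogOrCat, lastLongestIndex, currentCountingIndex,
      lastLongestIndexLength, currentCountingIndexLength =>
    let (flag', curIdx', curLen') :=
      if !lastIndexWasDogOrCat then
        if currentAnimal == "perro" || currentAnimal == "gato" then
          (true, i, currentCountingIndexLength + 1)
        else
          (lastIndexWasDogOrCat, currentCountingIndex, currentCountingIndexLength)
      else
        if currentAnimal == "perro" || currentAnimal == "gato" then
          (lastIndexWasDogOrCat, currentCountingIndex, currentCountingIndexLength + 1)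
        else
          (false, currentCountingIndex, 0)
    let (lastIdx', lastLen') :=
      if curLen' > lastLongestIndexLength then (curIdx', curLen')
      else (lastLongestIndex, lastLongestIndexLength)
    pvLoopA rest (i + 1) flag' lastIdx' curIdx' lastLen' curLen'

def subsecuencia_mas_larga (tipos_pacientes_atendidos : List String) : Int :=
  pvLoopA tipos_pacientes_atendidos 0 false 0 0 0 0

-- ===== PORT B =====
def pvIsPG (s : String) : Bool := s == "perro" || s == "gato"

-- Source B's inner while loop: count the leading perro/gato elements, return the rest.
def pvTakeRun : List String → Int × List String
  | [] => (0, [])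
  | x :: rest =>
    if pvIsPG x then ((pvTakeRun rest).1 + 1, (pvTakeRun rest).2)
    else (0, x :: rest)

theorem pvTakeRun_len (xs : List String) : (pvTakeRun xs).2.length ≤ xs.length := by
  induction xs with
  | nil => simp [pvTakeRun]
  | cons x rest ih =>
    by_cases h : pvIsPG x = true <;> simp [pvTakeRun, h] <;> omega

-- Source B's outer while loop: the list of maximal perro/gato runs as (start, length).
def pvRuns : List String → Int → List (Int × Int)
  | [], _ => []
  | x :: rest, i =>
    if pvIsPG x then
      (i, (pvTakeRun rest).1 + 1) :: pvRuns (pvTakeRun rest).2 (i + (pvTakeRun rest).1 + 1)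
    else
      pvRuns rest (i + 1)
termination_by xs _ => xs.length
decreasing_by
  · have := pvTakeRun_len rest; simp; omega
  · simp

-- Source B's phase-2 selection step (keeps the first strictly longest run).
def pvSel (b : Int × Int) (r : Int × Int) : Int × Int :=
  if r.2 > b.2 then r else b

def subsecuencia_mas_larga_alt (tipos_pacientes_atendidos : List String) : Int :=
  ((pvRuns tipos_pacientes_atendidos 0).foldl pvSel ((0 : Int), (0 : Int))).1

-- ===== PRECONDITION & SPEC =====
def Spec_subsecuencia_mas_larga (tipos_pacientes_atendidos : List String) (out : Int) : Prop := out = subsecuencia_mas_larga_alt tipos_pacientes_atendidos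
instance (tipos_pacientes_atendidos : List String) (out : Int) : Decidable (Spec_subsecuencia_mas_larga tipos_pacientes_atendidos out) := by unfold Spec_subsecuencia_mas_larga; infer_instance

-- ===== CLAIM (what is proved, stated in full; the proofs are below) =====
def Claim_equal_subsecuencia_mas_larga : Prop := ∀ (tipos_pacientes_atendidos : List String), Dom_subsecuencia_mas_larga tipos_pacientes_atendidos → Spec_subsecuencia_mas_larga tipos_pacientes_atendidos (subsecuencia_mas_larga tipos_pacientes_atendidos)

-- ===== LEMMAS AND PROOFS =====

theorem pvTakeRun_nonneg (xs : List String) : 0 ≤ (pvTakeRun xs).1 := by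
  induction xs with
  | nil => simp [pvTakeRun]
  | cons x rest ih => by_cases h : pvIsPG x = true <;> simp [pvTakeRun, h] <;> omega

-- the remainder after a run is empty or starts with a non-perro/gato element
theorem pvTakeRun_head (xs : List String) :
    (pvTakeRun xs).2 = [] ∨
      ∃ y t, (pvTakeRun xs).2 = y :: t ∧ pvIsPG y = false := by
  induction xs with
  | nil => left; simp [pvTakeRun]
  | cons x rest ih =>
    by_cases h : pvIsPG x = true
    · simpa [pvTakeRun, h] using ih
    · right; exact ⟨x, rest, by simp [pvTakeRun, h], by simpa using h⟩

-- one step of A's loop, in each of the four flag/element cases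
theorem stepA_true_pg (x : String) (rest : List String) (i L s ll cl : Int)
    (hx : (x == "perro" || x == "gato") = true) :
    pvLoopA (x :: rest) i true L s ll cl =
      pvLoopA rest (i + 1) true (if cl + 1 > ll then s else L) s (max ll (cl + 1)) (cl + 1) := by
  simp only [pvLoopA, hx, Bool.not_true, Bool.false_eq_true, if_false, if_true]
  by_cases h1 : cl + 1 > ll
  · rw [if_pos h1, if_pos h1, show max ll (cl + 1) = cl + 1 by omega]
  · rw [if_neg h1, if_neg h1, show max ll (cl + 1) = ll by omega]

theorem stepA_true_other (x : String) (rest : List String) (i L s ll cl : Int)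
    (hll : 0 ≤ ll) (hx : (x == "perro" || x == "gato") = false) :
    pvLoopA (x :: rest) i true L s ll cl = pvLoopA rest (i + 1) false L s ll 0 := by
  simp only [pvLoopA, hx, Bool.not_true, Bool.false_eq_true, if_false]
  rw [if_neg (by omega : ¬ ((0:Int) > ll))]

theorem stepA_false_pg (x : String) (rest : List String) (i L c ll : Int)
    (hx : (x == "perro" || x == "gato") = true) :
    pvLoopA (x :: rest) i false L c ll 0 =
      pvLoopA rest (i + 1) true (if 1 > ll then i else L) i (max ll 1) 1 := by
  simp only [pvLoopA, hx, Bool.not_false, if_true]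
  by_cases h1 : (0:Int) + 1 > ll
  · rw [if_pos h1, if_pos (show (1:Int) > ll by omega)]
    norm_num
    rw [show max ll 1 = 1 by omega]
  · rw [if_neg h1, if_neg (show ¬ ((1:Int) > ll) by omega)]
    norm_num
    rw [show max ll 1 = ll by omega]

theorem stepA_false_other (x : String) (rest : List String) (i L c ll : Int)
    (hll : 0 ≤ ll) (hx : (x == "perro" || x == "gato") = false) :
    pvLoopA (x :: rest) i false L c ll 0 = pvLoopA rest (i + 1) false L c ll 0 := by
  simp only [pvLoopA, hx, Bool.not_false, if_true, Bool.false_eq_true, if_false]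
  rw [if_neg (by omega : ¬ ((0:Int) > ll))]

-- consuming a run: A's loop from an in-run state jumps to the end of the run
theorem pvLoopA_run (rest : List String) :
    ∀ (i L s ll cl : Int), cl ≤ ll →
      pvLoopA rest i true L s ll cl =
        pvLoopA (pvTakeRun rest).2 (i + (pvTakeRun rest).1) true
          (if cl + (pvTakeRun rest).1 > ll then s else L) s
          (max ll (cl + (pvTakeRun rest).1)) (cl + (pvTakeRun rest).1) := by
  induction rest with
  | nil =>
    intro i L s ll cl h
    simp only [pvTakeRun]
    rw [if_neg (by omega : ¬ (cl + 0 > ll)), show max ll (cl + 0) = ll by omega,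
      show cl + 0 = cl by omega, show i + 0 = i by omega]
  | cons x rest ih =>
    intro i L s ll cl h
    by_cases hx : pvIsPG x = true
    · have hx' : (x == "perro" || x == "gato") = true := by simpa [pvIsPG] using hx
      have hn := pvTakeRun_nonneg rest
      rw [stepA_true_pg x rest i L s ll cl hx',
        ih (i + 1) (if cl + 1 > ll then s else L) s (max ll (cl + 1)) (cl + 1) (by omega)]
      have htr1 : (pvTakeRun (x :: rest)).1 = (pvTakeRun rest).1 + 1 := by
        simp [pvTakeRun, hx]
      have htr2 : (pvTakeRun (x :: rest)).2 = (pvTakeRun rest).2 := by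
        simp [pvTakeRun, hx]
      rw [htr1, htr2]
      have e2 : (if cl + 1 + (pvTakeRun rest).1 > max ll (cl + 1) then s
            else if cl + 1 > ll then s else L) =
          (if cl + ((pvTakeRun rest).1 + 1) > ll then s else L) := by
        split_ifs <;> first | rfl | omega
      have e3 : max (max ll (cl + 1)) (cl + 1 + (pvTakeRun rest).1) =
          max ll (cl + ((pvTakeRun rest).1 + 1)) := by omega
      rw [e2, e3, show cl + 1 + (pvTakeRun rest).1 = cl + ((pvTakeRun rest).1 + 1) by omega,
        show i + 1 + (pvTakeRun rest).1 = i + ((pvTakeRun rest).1 + 1) by omega]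
    · have hx0 : pvIsPG x = false := by simpa using hx
      have hx' : (x == "perro" || x == "gato") = false := hx0
      have htr1 : (pvTakeRun (x :: rest)).1 = 0 := by simp [pvTakeRun, hx]
      have htr2 : (pvTakeRun (x :: rest)).2 = x :: rest := by simp [pvTakeRun, hx]
      rw [htr1, htr2, if_neg (by omega : ¬ (cl + 0 > ll)),
        show max ll (cl + 0) = ll by omega, show cl + 0 = cl by omega,
        show i + 0 = i by omega]

-- main invariant: A's loop from a between-runs state computes B's phase-2 fold of the
-- remaining runs, seeded with the best-so-far pair
theorem pvLoopA_eq_runs (xs : List String) (i : Int) :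
    ∀ (L c ll : Int), 0 ≤ ll →
      pvLoopA xs i false L c ll 0 = ((pvRuns xs i).foldl pvSel (L, ll)).1 := by
  induction xs, i using pvRuns.induct with
  | case1 i => intro L c ll h; simp [pvLoopA, pvRuns]
  | case2 x rest i hx ih =>
    intro L c ll h
    have hx' : (x == "perro" || x == "gato") = true := by simpa [pvIsPG] using hx
    have hn := pvTakeRun_nonneg rest
    rw [stepA_false_pg x rest i L c ll hx',
      pvLoopA_run rest (i + 1) (if 1 > ll then i else L) i (max ll 1) 1 (by omega)]
    rcases pvTakeRun_head rest with h0 | ⟨y, t, he, hy⟩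
    · rw [h0]
      have hruns : pvRuns (x :: rest) i =
          (i, (pvTakeRun rest).1 + 1) :: pvRuns (pvTakeRun rest).2 (i + (pvTakeRun rest).1 + 1) := by
        rw [pvRuns]; simp [hx]
      rw [hruns, h0]
      rw [pvRuns]
      simp only [pvLoopA, List.foldl_cons, List.foldl_nil, pvSel]
      split_ifs <;> simp_all <;> omega
    · have hy' : (y == "perro" || y == "gato") = false := hy
      rw [he, stepA_true_other y t (i + 1 + (pvTakeRun rest).1)
          (if 1 + (pvTakeRun rest).1 > max ll 1 then i else if 1 > ll then i else L) i
          (max (max ll 1) (1 + (pvTakeRun rest).1)) (1 + (pvTakeRun rest).1) (by omega) hy',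
        show i + 1 + (pvTakeRun rest).1 + 1 = i + (pvTakeRun rest).1 + 1 + 1 by omega,
        ← stepA_false_other y t (i + (pvTakeRun rest).1 + 1)
          (if 1 + (pvTakeRun rest).1 > max ll 1 then i else if 1 > ll then i else L) i
          (max (max ll 1) (1 + (pvTakeRun rest).1)) (by omega) hy',
        ← he, ih _ i _ (by omega)]
      have hruns : pvRuns (x :: rest) i =
          (i, (pvTakeRun rest).1 + 1) :: pvRuns (pvTakeRun rest).2 (i + (pvTakeRun rest).1 + 1) := by
        rw [pvRuns]; simp [hx]
      rw [hruns]
      simp only [List.foldl_cons, pvSel]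
      congr 2
      split_ifs <;> simp_all [Prod.ext_iff] <;> omega
  | case3 x rest i hx ih =>
    intro L c ll h
    have hx' : (x == "perro" || x == "gato") = false := by simpa [pvIsPG] using hx
    rw [stepA_false_other x rest i L c ll h hx', ih L c ll h]
    rw [pvRuns]; simp [hx]

-- ===== VERDICT (by name: the statement is the Claim_ definition above) =====
theorem subsecuencia_mas_larga_spec : Claim_equal_subsecuencia_mas_larga := by
  intro xs _
  show subsecuencia_mas_larga xs = subsecuencia_mas_larga_alt xs
  unfold subsecuencia_mas_larga subsecuencia_mas_larga_alt
  exact pvLoopA_eq_runs xs 0 0 0 0 (by omega)
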